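-- pv_equiv track=rewrite | github.com/neznajko/Necklace | Necklace.py | maxCont
-- ===== SOURCE A (Python) =====
-- def clcknext(j, n):
--   """ solid as a [s]ock """
--   j += 1
--   if j == n: j = 0
--   return j
--
-- def clckprev(j, n):
--   """ bo[+]m """
--   j -= 1
--   # w=[ 1, 2, 3 ], w[-3] iz 1, but w[-4] is boom.
--   if j < -n: j = -1
--   return j
--
-- def cont(s, j):
--   """ x [o] g u   n e E """
--   # at least we have 2:
--   x = 2
--   bwd = j - 1 # backward position
--   fwd = j     # w h a t i s t h i s ?
--   n = len(s)
--   while True: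
--     prev = clckprev(bwd, n)
--     if s[prev] != s[bwd]: break
--     x += 1
--     bwd = prev
--   while True:
--     next = clcknext(fwd, n)
--     if s[next] != s[fwd]: break
--     x += 1
--     fwd = next
--   return x
--
-- def getJunctions(s):
--   """ 6 e 3   g y M u """
--   junc = []
--   for j in range(len(s)):
--     if s[j] != s[j - 1]:
--       junc.append(j)
--   return junc
--
-- def maxCont(s):
--   """          """
--   mx = 0  # max cont
--   mj = -1 # mx junction
--   for j in getJunctions(s):
--     x = cont(s, j)
--     if mx < x:
--       mx, mj = x, j
--   if mj < 0: mx = len(s)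
--   return mx, mj
-- ===== SOURCE B (Python) =====
-- def maxCont(s):
--     n = len(s)
--     js = [j for j in range(n) if s[j] != s[j - 1]]
--     if not js:
--         return n, -1
--     m = len(js)
--     gaps = [(js[t + 1] if t + 1 < m else js[0] + n) - js[t] for t in range(m)]
--     mx, mj = 0, -1
--     for t in range(m):
--         x = gaps[t - 1] + gaps[t]
--         if mx < x:
--             mx, mj = x, js[t]
--     return mx, mj
-- ===== Notes on version B (the rewrite author's own statement) =====
-- stated objective: faster
-- what changed: Instead of re-scanning characters backward and forward around every junction with clock-step helpers, B computes the junction list once and obtains each junction's combined run length purely by index arithmetic as the sum of the two adjacent cyclic gaps between consecutive junctions.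
import Mathlib
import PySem

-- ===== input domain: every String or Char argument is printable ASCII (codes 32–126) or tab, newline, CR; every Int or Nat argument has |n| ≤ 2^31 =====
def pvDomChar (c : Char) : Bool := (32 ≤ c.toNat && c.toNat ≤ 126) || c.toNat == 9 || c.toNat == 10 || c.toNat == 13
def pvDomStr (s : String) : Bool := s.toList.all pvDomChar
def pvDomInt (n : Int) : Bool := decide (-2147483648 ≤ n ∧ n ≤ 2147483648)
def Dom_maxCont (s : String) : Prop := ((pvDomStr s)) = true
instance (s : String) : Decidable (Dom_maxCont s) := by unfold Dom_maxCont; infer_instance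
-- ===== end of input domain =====

-- B replaces A's per-junction bidirectional character re-scanning by one junction list plus
-- cyclic-gap arithmetic (each junction's value = sum of its two adjacent gaps); measurably
-- faster by a constant factor (both are linear overall).

-- ===== PORT A =====
def clcknextL (j n : Int) : Int :=
  let j := j + 1
  if j = n then 0 else j

def clckprevL (j n : Int) : Int :=
  let j := j - 1
  if j < -n then -1 else j

-- the two while-loops of Python's cont; fuel = len(s) bounds the iterations (the scan stops
-- at a junction within len(s)-1 steps whenever one exists, and cont is only called on junctions)
def contBwd (l : List Char) (n : Int) : Nat → Int → Int → Int
  | 0, x, _ => x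
  | fuel+1, x, bwd =>
    let prev := clckprevL bwd n
    if PySem.List.pyGet? l prev ≠ PySem.List.pyGet? l bwd then x
    else contBwd l n fuel (x+1) prev

def contFwd (l : List Char) (n : Int) : Nat → Int → Int → Int
  | 0, x, _ => x
  | fuel+1, x, fwd =>
    let nxt := clcknextL fwd n
    if PySem.List.pyGet? l nxt ≠ PySem.List.pyGet? l fwd then x
    else contFwd l n fuel (x+1) nxt

def contA (l : List Char) (j : Int) : Int :=
  let n : Int := l.length
  let x := contBwd l n l.length 2 (j - 1)
  contFwd l n l.length x j

def getJunctionsA (l : List Char) : List Int :=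
  (PySem.List.pyRange 0 (l.length : Int) 1).foldl
    (fun junc j => if PySem.List.pyGet? l j ≠ PySem.List.pyGet? l (j-1) then junc ++ [j] else junc) []

def maxCont (s : String) : Int × Int :=
  let l := s.toList
  let p := (getJunctionsA l).foldl
    (fun (acc : Int × Int) j => let x := contA l j; if acc.1 < x then (x, j) else acc) (0, -1)
  if p.2 < 0 then ((l.length : Int), p.2) else p

-- ===== PORT B =====
-- js = [j for j in range(n) if s[j] != s[j-1]]
def jsB (l : List Char) : List Int :=
  (PySem.List.pyRange 0 (l.length : Int) 1).filter
    (fun j => PySem.List.pyGet? l j ≠ PySem.List.pyGet? l (j-1))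

-- gaps[t] = (js[t+1] if t+1 < m else js[0] + n) - js[t]
def gapsB (l : List Char) : List Int :=
  (PySem.List.pyRange 0 ((jsB l).length : Int) 1).map
    (fun t => (if t + 1 < ((jsB l).length : Int) then PySem.List.pyGetD (jsB l) (t+1) 0
               else PySem.List.pyGetD (jsB l) 0 0 + (l.length : Int)) - PySem.List.pyGetD (jsB l) t 0)

def maxCont_alt (s : String) : Int × Int :=
  let l := s.toList
  if jsB l = [] then ((l.length : Int), -1)
  else
    (PySem.List.pyRange 0 ((jsB l).length : Int) 1).foldl
      (fun (acc : Int × Int) t =>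
        let x := PySem.List.pyGetD (gapsB l) (t-1) 0 + PySem.List.pyGetD (gapsB l) t 0
        if acc.1 < x then (x, PySem.List.pyGetD (jsB l) t 0) else acc) (0, -1)

-- ===== PRECONDITION & SPEC =====
def Spec_maxCont (s : String) (out : Int × Int) : Prop := out = maxCont_alt s
instance (s : String) (out : Int × Int) : Decidable (Spec_maxCont s out) := by unfold Spec_maxCont; infer_instance

-- ===== CLAIM (what is proved, stated in full; the proofs are below) =====
def Claim_equal_maxCont : Prop := ∀ (s : String), Dom_maxCont s → Spec_maxCont s (maxCont s)

-- ===== LEMMAS AND PROOFS =====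

-- character at cyclic position i (proofs only)
def charAt (l : List Char) (i : Int) : Char :=
  (PySem.List.pyGet? l (i % (l.length : Int))).getD ' '

-- cyclic junction predicate (proofs only)
def Qj (l : List Char) (i : Int) : Prop := charAt l i ≠ charAt l (i-1)

theorem pyGet?_inrange (l : List Char) (i : Int) (h1 : -(l.length : Int) ≤ i)
    (h2 : i < (l.length : Int)) : PySem.List.pyGet? l i = some (charAt l i) := by
  unfold charAt
  by_cases h : 0 ≤ i
  · rw [Int.emod_eq_of_lt h h2, PySem.List.pyGet?_of_nonneg l h]
    have : i.toNat < l.length := by omega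
    simp [List.getElem?_eq_getElem this]
  · have h : i < 0 := by omega
    have hn : 0 < l.length := by omega
    have hk : i = -((-i).toNat : Int) := by omega
    have him : i % (l.length : Int) = i + l.length := by
      have h1' : (i + (l.length : Int)) % (l.length : Int) = i % (l.length : Int) := by
        rw [show i + (l.length : Int) = i + (l.length : Int) * 1 by ring,
          Int.add_mul_emod_self_left]
      rw [← h1', Int.emod_eq_of_lt (by omega) (by omega)]
    have hmod : i % (l.length : Int) = ((l.length - (-i).toNat : Nat) : Int) := by omega
    rw [hk, PySem.List.pyGet?_neg_natCast l (-i).toNat (by omega) (by omega), ← hk, hmod,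
      PySem.List.pyGet?_of_nonneg l (by positivity)]
    have ht : ((l.length - (-i).toNat : Nat) : Int).toNat = l.length - (-i).toNat := by omega
    rw [ht]
    have hlt : l.length - (-i).toNat < l.length := by omega
    simp [List.getElem?_eq_getElem hlt]


theorem charAt_congr (l : List Char) {i j : Int}
    (h : i % (l.length : Int) = j % (l.length : Int)) : charAt l i = charAt l j := by
  unfold charAt; rw [h]
theorem emod_add_congr {a b : Int} (n k : Int) (h : a % n = b % n) :
    (a + k) % n = (b + k) % n := by
  rw [Int.add_emod, h, ← Int.add_emod]
theorem emod_sub_congr {a b : Int} (n k : Int) (h : a % n = b % n) :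
    (a - k) % n = (b - k) % n := by
  rw [Int.sub_emod, h, ← Int.sub_emod]
theorem Qj_congr (l : List Char) {i j : Int}
    (h : i % (l.length : Int) = j % (l.length : Int)) : Qj l i ↔ Qj l j := by
  unfold Qj
  rw [charAt_congr l h, charAt_congr l (emod_sub_congr _ 1 h)]
theorem emod_emod (a n : Int) : a % n % n = a % n := Int.emod_emod_of_dvd a dvd_rfl

theorem clcknext_eq (p n : Int) (h0 : 0 ≤ p) (h1 : p < n) : clcknextL p n = (p+1) % n := by
  unfold clcknextL
  simp only
  split
  · rename_i h; rw [h, Int.emod_self]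
  · exact (Int.emod_eq_of_lt (by omega) (by omega)).symm

theorem clckprev_spec (b n : Int) (_hn : 0 < n) (h1 : -n ≤ b) (h2 : b < n) :
    -n ≤ clckprevL b n ∧ clckprevL b n < n ∧ clckprevL b n % n = (b-1) % n := by
  unfold clckprevL
  simp only
  split
  · refine ⟨by omega, by omega, ?_⟩
    have hb : b - 1 = -1 + n * (-1) := by omega
    rw [hb, Int.add_mul_emod_self_left]
  · exact ⟨by omega, by omega, rfl⟩

theorem cond_next (l : List Char) (p : Int) (h0 : 0 ≤ p) (h1 : p < (l.length : Int)) :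
    (PySem.List.pyGet? l (clcknextL p (l.length : Int)) ≠ PySem.List.pyGet? l p) ↔ Qj l (p+1) := by
  have hn : (0:Int) < l.length := by omega
  rw [clcknext_eq p _ h0 h1,
    pyGet?_inrange l ((p+1) % (l.length:Int))
      (by have h5 : 0 ≤ (p+1) % (l.length:Int) := Int.emod_nonneg _ (by omega); omega)
      (Int.emod_lt_of_pos _ hn),
    pyGet?_inrange l p (by omega) h1]
  have h2 : charAt l ((p+1) % (l.length:Int)) = charAt l (p+1) := charAt_congr l (emod_emod _ _)
  have h3 : charAt l (p+1-1) = charAt l p := by norm_num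
  unfold Qj
  rw [h2, h3]
  simp

theorem cond_prev (l : List Char) (b : Int) (h1 : -(l.length : Int) ≤ b)
    (h2 : b < (l.length : Int)) (hn : 0 < l.length) :
    (PySem.List.pyGet? l (clckprevL b (l.length : Int)) ≠ PySem.List.pyGet? l b) ↔ Qj l b := by
  obtain ⟨hb1, hb2, hb3⟩ := clckprev_spec b (l.length : Int) (by omega) h1 h2
  rw [pyGet?_inrange l _ hb1 hb2, pyGet?_inrange l b h1 h2]
  have h4 : charAt l (clckprevL b (l.length:Int)) = charAt l (b-1) := charAt_congr l hb3
  unfold Qj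
  rw [h4]
  simp [ne_comm]

theorem contFwd_run (l : List Char) : ∀ (fuel d : Nat) (x p : Int),
    0 ≤ p → p < (l.length : Int) → 1 ≤ d → d ≤ fuel + 1 →
    (∀ k : Nat, 1 ≤ k → k < d → ¬ Qj l (p + k)) → Qj l (p + d) →
    contFwd l (l.length : Int) fuel x p = x + d - 1 := by
  intro fuel
  induction fuel with
  | zero =>
    intro d x p h0 h1 hd hdf hks hQ
    have : d = 1 := by omega
    subst this
    simp [contFwd]
  | succ f ih =>
    intro d x p h0 h1 hd hdf hks hQ
    have hn : (0:Int) < l.length := by omega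
    simp only [contFwd]
    by_cases hq : Qj l (p+1)
    · have hd1 : d = 1 := by
        by_contra hc
        exact hks 1 (by omega) (by omega) (by simpa using hq)
      subst hd1
      rw [if_pos ((cond_next l p h0 h1).mpr hq)]
      simp
    · have hd2 : 2 ≤ d := by
        rcases Nat.eq_or_lt_of_le hd with h | h
        · exfalso; apply hq; simpa [← h] using hQ
        · omega
      rw [if_neg (fun hcon => hq ((cond_next l p h0 h1).mp hcon))]
      have hmod : ((p+1) % (l.length:Int)) % (l.length:Int) = (p+1) % (l.length:Int) :=
        emod_emod _ _
      rw [clcknext_eq p _ h0 h1]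
      rw [ih (d-1) (x+1) ((p+1) % (l.length:Int))
        (by have h5 : 0 ≤ (p+1) % (l.length:Int) := Int.emod_nonneg _ (by omega); omega)
        (Int.emod_lt_of_pos _ hn) (by omega) (by omega)
        (by
          intro k hk1 hk2
          have heq : ((p+1) % (l.length:Int) + (k:Int)) % (l.length:Int)
              = (p + ((k+1 : Nat) : Int)) % (l.length:Int) := by
            rw [emod_add_congr _ (k:Int) hmod]
            push_cast
            ring_nf
          exact fun hqq => hks (k+1) (by omega) (by omega) ((Qj_congr l heq).mp hqq))
        (by
          have heq : ((p+1) % (l.length:Int) + ((d-1 : Nat):Int)) % (l.length:Int)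
              = (p + (d:Int)) % (l.length:Int) := by
            rw [emod_add_congr _ _ hmod]
            push_cast [Nat.cast_sub (by omega : 1 ≤ d)]
            ring_nf
          exact (Qj_congr l heq).mpr hQ)]
      push_cast [Nat.cast_sub (by omega : 1 ≤ d)]
      ring

theorem contBwd_run (l : List Char) : ∀ (fuel e : Nat) (x b : Int),
    -(l.length : Int) ≤ b → b < (l.length : Int) → 1 ≤ e → e ≤ fuel + 1 →
    (∀ k : Nat, k < e - 1 → ¬ Qj l (b - k)) → Qj l (b - ((e-1 : Nat) : Int)) →
    contBwd l (l.length : Int) fuel x b = x + e - 1 := by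
  intro fuel
  induction fuel with
  | zero =>
    intro e x b h0 h1 he hef hks hQ
    have : e = 1 := by omega
    subst this
    simp [contBwd]
  | succ f ih =>
    intro e x b h0 h1 he hef hks hQ
    have hn : 0 < l.length := by omega
    obtain ⟨hb1, hb2, hb3⟩ := clckprev_spec b (l.length : Int) (by omega) h0 h1
    simp only [contBwd]
    by_cases hq : Qj l b
    · have he1 : e = 1 := by
        by_contra hc
        exact hks 0 (by omega) (by simpa using hq)
      subst he1
      rw [if_pos ((cond_prev l b h0 h1 hn).mpr hq)]
      simp
    · have he2 : 2 ≤ e := by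
        rcases Nat.eq_or_lt_of_le he with h | h
        · exfalso; apply hq; simpa [← h] using hQ
        · omega
      rw [if_neg (fun hcon => hq ((cond_prev l b h0 h1 hn).mp hcon))]
      rw [ih (e-1) (x+1) (clckprevL b (l.length:Int)) hb1 hb2 (by omega) (by omega)
        (by
          intro k hk
          have heq : (clckprevL b (l.length:Int) - (k:Int)) % (l.length:Int)
              = (b - ((k+1 : Nat) : Int)) % (l.length:Int) := by
            rw [emod_sub_congr _ (k:Int) hb3]
            push_cast
            ring_nf
          exact fun hqq => hks (k+1) (by omega) ((Qj_congr l heq).mp hqq))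
        (by
          have heq : (clckprevL b (l.length:Int) - ((e-1-1 : Nat):Int)) % (l.length:Int)
              = (b - ((e-1 : Nat) : Int)) % (l.length:Int) := by
            rw [emod_sub_congr _ _ hb3]
            push_cast [Nat.cast_sub (by omega : 1 ≤ e), Nat.cast_sub (by omega : 1 ≤ e - 1)]
            ring_nf
          exact (Qj_congr l heq).mpr hQ)]
      push_cast [Nat.cast_sub (by omega : 1 ≤ e)]
      ring

theorem contA_run (l : List Char) (j : Int) (e d : Nat)
    (h0 : 0 ≤ j) (h1 : j < (l.length : Int))
    (he : 1 ≤ e) (hen : e ≤ l.length) (hd : 1 ≤ d) (hdn : d ≤ l.length)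
    (hkd : ∀ k : Nat, 1 ≤ k → k < d → ¬ Qj l (j + k)) (hQd : Qj l (j + d))
    (hke : ∀ k : Nat, k < e - 1 → ¬ Qj l (j - 1 - k)) (hQe : Qj l (j - e)) :
    contA l j = (e : Int) + d := by
  unfold contA
  simp only
  rw [contBwd_run l l.length e 2 (j-1) (by omega) (by omega) he (by omega)
    (by intro k hk; have : j - 1 - (k:Int) = (j-1) - k := by ring
        exact fun hq => hke k hk (by rwa [this] at hq ⊢))
    (by have : (j-1) - ((e-1 : Nat):Int) = j - e := by
          push_cast [Nat.cast_sub (by omega : 1 ≤ e)]; ring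
        rwa [this]),
    contFwd_run l l.length d (2 + e - 1) j h0 h1 hd (by omega) hkd hQd]
  ring

theorem mem_jsB (l : List Char) (q : Int) :
    q ∈ jsB l ↔ 0 ≤ q ∧ q < (l.length : Int) ∧
      PySem.List.pyGet? l q ≠ PySem.List.pyGet? l (q-1) := by
  simp [jsB, List.mem_filter, PySem.List.mem_pyRange_one, and_assoc]

theorem jsB_pairwise (l : List Char) : (jsB l).Pairwise (· < ·) :=
  (PySem.List.pairwise_lt_pyRange_one 0 (l.length : Int)).filter _

theorem jsB_getElem_lt (l : List Char) {i k : Nat} (hk : k < (jsB l).length) (h : i < k) :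
    (jsB l)[i]'(by omega) < (jsB l)[k] :=
  (List.pairwise_iff_getElem.mp (jsB_pairwise l)) i k (by omega) hk h

theorem jsB_getElem_le (l : List Char) {i k : Nat} (hk : k < (jsB l).length) (h : i ≤ k) :
    (jsB l)[i]'(by omega) ≤ (jsB l)[k] := by
  rcases Nat.eq_or_lt_of_le h with rfl | h'
  · exact le_refl _
  · exact le_of_lt (jsB_getElem_lt l hk h')

theorem jsB_bounds (l : List Char) {t : Nat} (ht : t < (jsB l).length) :
    0 ≤ (jsB l)[t] ∧ (jsB l)[t] < (l.length : Int) := by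
  have := (mem_jsB l _).mp (List.getElem_mem ht)
  exact ⟨this.1, this.2.1⟩

theorem not_mem_between (l : List Char) {t : Nat} (ht : t + 1 < (jsB l).length) {q : Int}
    (hq1 : (jsB l)[t]'(by omega) < q) (hq2 : q < (jsB l)[t+1]) : q ∉ jsB l := by
  intro hmem
  obtain ⟨i, hi, hiq⟩ := List.mem_iff_getElem.mp hmem
  rcases Nat.lt_or_ge i (t+1) with h | h
  · have := jsB_getElem_le l (show t < (jsB l).length by omega) (show i ≤ t by omega)
    omega
  · have := jsB_getElem_le l hi h
    omega

theorem not_mem_lt_head (l : List Char) (hm : 0 < (jsB l).length) {q : Int}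
    (hq : q < (jsB l)[0]) : q ∉ jsB l := by
  intro hmem
  obtain ⟨i, hi, hiq⟩ := List.mem_iff_getElem.mp hmem
  have := jsB_getElem_le l hi (Nat.zero_le i)
  omega

theorem not_mem_gt_last (l : List Char) (hm : 0 < (jsB l).length) {q : Int}
    (hq : (jsB l)[(jsB l).length - 1]'(by omega) < q) : q ∉ jsB l := by
  intro hmem
  obtain ⟨i, hi, hiq⟩ := List.mem_iff_getElem.mp hmem
  have := jsB_getElem_le l (show (jsB l).length - 1 < (jsB l).length by omega)
    (show i ≤ (jsB l).length - 1 by omega)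
  omega

theorem P_iff_Qj (l : List Char) {q : Int} (h0 : 0 ≤ q) (h1 : q < (l.length : Int)) :
    (PySem.List.pyGet? l q ≠ PySem.List.pyGet? l (q-1)) ↔ Qj l q := by
  rw [pyGet?_inrange l q (by omega) h1, pyGet?_inrange l (q-1) (by omega) (by omega)]
  unfold Qj
  simp

theorem Q_of_mem (l : List Char) {q : Int} (h : q ∈ jsB l) : Qj l q := by
  obtain ⟨h0, h1, hp⟩ := (mem_jsB l q).mp h
  exact (P_iff_Qj l h0 h1).mp hp

theorem notQ (l : List Char) {q : Int} (h0 : 0 ≤ q) (h1 : q < (l.length : Int))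
    (h : q ∉ jsB l) : ¬ Qj l q := by
  intro hq
  exact h ((mem_jsB l q).mpr ⟨h0, h1, (P_iff_Qj l h0 h1).mpr hq⟩)

-- the two gaps adjacent to junction t (proofs only; = B's gaps[t] and gaps[t-1])
def gapJ (l : List Char) (t : Nat) : Int :=
  (if t+1 < (jsB l).length then (jsB l).getD (t+1) 0 else (jsB l).getD 0 0 + (l.length : Int))
    - (jsB l).getD t 0

def gapP (l : List Char) (t : Nat) : Int :=
  if t = 0 then gapJ l ((jsB l).length - 1) else gapJ l (t-1)

theorem emod_add_n (a n : Int) : (a + n) % n = a % n := by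
  rw [show a + n = a + n*1 by ring, Int.add_mul_emod_self_left]

theorem emod_sub_n (a n : Int) : (a - n) % n = a % n := by
  rw [show a - n = a + n*(-1) by ring, Int.add_mul_emod_self_left]

theorem gapJ_interior (l : List Char) {t : Nat} (hc : t + 1 < (jsB l).length) :
    gapJ l t = (jsB l)[t+1] - (jsB l)[t]'(by omega) := by
  unfold gapJ
  rw [if_pos hc, List.getD_eq_getElem _ _ hc, List.getD_eq_getElem _ _ (by omega : t < (jsB l).length)]

theorem gapJ_last (l : List Char) {t : Nat} (ht : t < (jsB l).length)
    (hc : ¬ t + 1 < (jsB l).length) :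
    gapJ l t = (jsB l)[0]'(by omega) + (l.length : Int) - (jsB l)[t] := by
  unfold gapJ
  rw [if_neg hc, List.getD_eq_getElem _ _ ht, List.getD_eq_getElem _ _ (by omega : 0 < (jsB l).length)]

theorem gapJ_bounds (l : List Char) {t : Nat} (ht : t < (jsB l).length) :
    1 ≤ gapJ l t ∧ gapJ l t ≤ (l.length : Int) := by
  by_cases hc : t + 1 < (jsB l).length
  · rw [gapJ_interior l hc]
    have h1 := jsB_getElem_lt l hc (Nat.lt_succ_self t)
    have h2 := (jsB_bounds l hc).2
    have h3 := (jsB_bounds l (show t < (jsB l).length by omega)).1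
    omega
  · rw [gapJ_last l ht hc]
    have h1 := (jsB_bounds l ht).2
    have h2 := (jsB_bounds l (show 0 < (jsB l).length by omega)).1
    have h3 := jsB_getElem_le l ht (Nat.zero_le t)
    omega

theorem gapP_eq (l : List Char) {t : Nat} :
    (t = 0 → gapP l t = gapJ l ((jsB l).length - 1)) ∧
    (0 < t → gapP l t = gapJ l (t-1)) := by
  unfold gapP
  constructor
  · intro h; rw [if_pos h]
  · intro h; rw [if_neg (by omega)]

theorem gapP_bounds (l : List Char) {t : Nat} (ht : t < (jsB l).length) :
    1 ≤ gapP l t ∧ gapP l t ≤ (l.length : Int) := by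
  unfold gapP
  split
  · exact gapJ_bounds l (by omega)
  · exact gapJ_bounds l (by omega)

set_option maxHeartbeats 1000000 in
theorem contA_at (l : List Char) {t : Nat} (ht : t < (jsB l).length) :
    contA l ((jsB l).getD t 0) = gapP l t + gapJ l t := by
  have hm : 0 < (jsB l).length := by omega
  have hb := jsB_bounds l ht
  have hn : 0 < l.length := by omega
  have hd' := gapJ_bounds l ht
  have he' := gapP_bounds l ht
  rw [List.getD_eq_getElem _ _ ht]
  have hdc : (((gapJ l t).toNat : Nat) : Int) = gapJ l t := by omega
  have hec : (((gapP l t).toNat : Nat) : Int) = gapP l t := by omega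
  -- forward-side facts
  have hQd : Qj l ((jsB l)[t] + ((gapJ l t).toNat : Int)) := by
    rw [hdc]
    by_cases hc : t + 1 < (jsB l).length
    · rw [gapJ_interior l hc, show (jsB l)[t] + ((jsB l)[t+1] - (jsB l)[t]) = (jsB l)[t+1] by ring]
      exact Q_of_mem l (List.getElem_mem hc)
    · rw [gapJ_last l ht hc,
        show (jsB l)[t] + ((jsB l)[0]'(by omega) + (l.length:Int) - (jsB l)[t])
           = (jsB l)[0]'(by omega) + (l.length:Int) by ring]
      exact (Qj_congr l (emod_add_n _ _)).mpr (Q_of_mem l (List.getElem_mem (by omega)))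
  have hkd : ∀ k : Nat, 1 ≤ k → k < (gapJ l t).toNat → ¬ Qj l ((jsB l)[t] + (k:Int)) := by
    intro k hk1 hk2
    have hklt : (k : Int) < gapJ l t := by omega
    by_cases hc : t + 1 < (jsB l).length
    · rw [gapJ_interior l hc] at hklt
      have h2 := (jsB_bounds l hc).2
      exact notQ l (by omega) (by omega)
        (not_mem_between l hc (by omega) (by omega))
    · rw [gapJ_last l ht hc] at hklt
      have htm : t = (jsB l).length - 1 := by omega
      have h0b := (jsB_bounds l (show 0 < (jsB l).length by omega)).1
      have huse : (jsB l)[(jsB l).length - 1]'(by omega) = (jsB l)[t]'ht := by congr 1; omega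
      by_cases hq : (jsB l)[t] + (k:Int) < (l.length : Int)
      · exact notQ l (by omega) hq
          (not_mem_gt_last l hm (by rw [huse]; omega))
      · have heq : ((jsB l)[t] + (k:Int) - (l.length:Int)) % (l.length : Int)
            = ((jsB l)[t] + (k:Int)) % (l.length:Int) := emod_sub_n _ _
        refine fun hqq => notQ l (by omega) (by omega)
          (not_mem_lt_head l hm (show (jsB l)[t] + (k:Int) - (l.length:Int) < (jsB l)[0]'(by omega) by omega))
          ((Qj_congr l heq).mpr hqq)
    -- backward-side facts
  have hQe : Qj l ((jsB l)[t] - ((gapP l t).toNat : Int)) := by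
    rw [hec]
    by_cases h0 : t = 0
    · subst h0
      rw [(gapP_eq l).1 rfl, gapJ_last l (by omega) (by omega)]
      rw [show (jsB l)[0] - ((jsB l)[0]'(by omega) + (l.length:Int) - (jsB l)[(jsB l).length - 1]'(by omega))
          = (jsB l)[(jsB l).length - 1]'(by omega) - (l.length:Int) by ring]
      exact (Qj_congr l (emod_sub_n _ _)).mpr (Q_of_mem l (List.getElem_mem (by omega)))
    · rw [(gapP_eq l).2 (by omega), gapJ_interior l (by omega : (t-1) + 1 < (jsB l).length)]
      simp only [show t - 1 + 1 = t by omega]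
      rw [show ((jsB l)[t] - ((jsB l)[t] - (jsB l)[t-1]'(by omega)))
          = (jsB l)[t-1]'(by omega) by ring]
      exact Q_of_mem l (List.getElem_mem (show t-1 < (jsB l).length by omega))
  have hke : ∀ k : Nat, k < (gapP l t).toNat - 1 → ¬ Qj l ((jsB l)[t] - 1 - (k:Int)) := by
    intro k hk
    have hklt : (k : Int) < gapP l t - 1 := by omega
    by_cases h0 : t = 0
    · subst h0
      rw [(gapP_eq l).1 rfl, gapJ_last l (by omega) (by omega)] at hklt
      have hlast := (jsB_bounds l (show (jsB l).length - 1 < (jsB l).length by omega))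
      by_cases hq : 0 ≤ (jsB l)[0] - 1 - (k:Int)
      · exact notQ l hq (by omega)
          (not_mem_lt_head l hm (by omega))
      · have heq : ((jsB l)[0] - 1 - (k:Int) + (l.length:Int)) % (l.length : Int)
            = ((jsB l)[0] - 1 - (k:Int)) % (l.length:Int) := emod_add_n _ _
        refine fun hqq => notQ l (by omega) (by omega)
          (not_mem_gt_last l hm ?_) ((Qj_congr l heq).mpr hqq)
        omega
    · rw [(gapP_eq l).2 (by omega), gapJ_interior l (by omega : (t-1) + 1 < (jsB l).length)] at hklt
      simp only [show t - 1 + 1 = t by omega] at hklt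
      have h2 := (jsB_bounds l (show t-1 < (jsB l).length by omega)).1
      refine notQ l (by omega) (by omega) ?_
      have hnm := not_mem_between l (show (t-1) + 1 < (jsB l).length by omega)
        (q := (jsB l)[t] - 1 - (k:Int)) (by omega)
      simp only [show t - 1 + 1 = t by omega] at hnm
      exact hnm (by omega)
  have := contA_run l ((jsB l)[t]) (gapP l t).toNat (gapJ l t).toNat hb.1 hb.2
    (by omega) (by omega) (by omega) (by omega) hkd hQd hke hQe
  rw [this, hdc, hec]

theorem length_gapsB (l : List Char) : (gapsB l).length = (jsB l).length := by
  unfold gapsB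
  rw [List.length_map, PySem.List.length_pyRange_one]
  omega

theorem gapsB_getElem (l : List Char) {t : Nat} (ht : t < (jsB l).length) :
    (gapsB l)[t]'(by rw [length_gapsB]; omega) = gapJ l t := by
  unfold gapsB
  rw [List.getElem_map, PySem.List.getElem_pyRange_one]
  rw [show (0 : Int) + (t:Int) = ((t:Nat):Int) by ring]
  rw [show ((t:Nat):Int) + 1 = ((t+1 : Nat):Int) by push_cast; ring]
  rw [PySem.List.pyGetD_natCast, PySem.List.pyGetD_natCast, PySem.List.pyGetD_zero]
  unfold gapJ
  by_cases hc : t + 1 < (jsB l).length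
  · rw [if_pos hc, if_pos (by exact_mod_cast hc)]
  · rw [if_neg hc, if_neg (by exact_mod_cast hc)]

theorem gapsB_get (l : List Char) {t : Nat} (ht : t < (jsB l).length) :
    PySem.List.pyGetD (gapsB l) ((t:Nat):Int) 0 = gapJ l t := by
  rw [PySem.List.pyGetD_natCast, List.getD_eq_getElem _ _ (by rw [length_gapsB]; omega)]
  exact gapsB_getElem l ht

theorem gapsB_get_pred (l : List Char) {t : Nat} (ht : t < (jsB l).length) :
    PySem.List.pyGetD (gapsB l) (((t:Nat):Int) - 1) 0 = gapP l t := by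
  have hm : 0 < (jsB l).length := by omega
  by_cases h0 : t = 0
  · subst h0
    rw [show ((0:Nat):Int) - 1 = (-1 : Int) by norm_num]
    rw [PySem.List.pyGetD_neg_one (gapsB l) 0 (by
      intro hnil
      have := length_gapsB l
      rw [hnil] at this
      simp at this
      omega)]
    rw [List.getLast_eq_getElem]
    unfold gapP
    rw [if_pos rfl]
    have : (gapsB l).length - 1 = (jsB l).length - 1 := by rw [length_gapsB]
    rw [← gapsB_getElem l (show (jsB l).length - 1 < (jsB l).length by omega)]
    congr 1
  · rw [show ((t:Nat):Int) - 1 = ((t - 1 : Nat):Int) by omega]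
    rw [PySem.List.pyGetD_natCast, List.getD_eq_getElem _ _ (by rw [length_gapsB]; omega)]
    unfold gapP
    rw [if_neg h0]
    exact gapsB_getElem l (by omega)

theorem jsB_get (l : List Char) {t : Nat} (ht : t < (jsB l).length) :
    PySem.List.pyGetD (jsB l) ((t:Nat):Int) 0 = (jsB l)[t] := by
  rw [PySem.List.pyGetD_natCast, List.getD_eq_getElem _ _ ht]

theorem fold_eq (l : List Char) : ∀ (c k : Nat), (jsB l).length - k = c → k ≤ (jsB l).length →
    ∀ acc : Int × Int,
    ((jsB l).drop k).foldl
      (fun (acc : Int × Int) j => let x := contA l j; if acc.1 < x then (x, j) else acc) acc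
    = (PySem.List.pyRange (k : Int) ((jsB l).length : Int) 1).foldl
      (fun (acc : Int × Int) t =>
        let x := PySem.List.pyGetD (gapsB l) (t-1) 0 + PySem.List.pyGetD (gapsB l) t 0
        if acc.1 < x then (x, PySem.List.pyGetD (jsB l) t 0) else acc) acc := by
  intro c
  induction c with
  | zero =>
    intro k hkc hk acc
    have hk' : k = (jsB l).length := by omega
    subst hk'
    rw [List.drop_of_length_le (le_refl _), PySem.List.pyRange_one_eq_nil (le_refl _)]
    rfl
  | succ c ih =>
    intro k hkc hk acc
    have hklt : k < (jsB l).length := by omega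
    rw [List.drop_eq_getElem_cons hklt,
      PySem.List.pyRange_one_cons (by exact_mod_cast hklt)]
    rw [List.foldl_cons, List.foldl_cons]
    rw [show (k:Int) + 1 = ((k+1 : Nat):Int) by push_cast; ring]
    rw [ih (k+1) (by omega) (by omega)]
    congr 1
    simp only
    rw [gapsB_get_pred l hklt, gapsB_get l hklt, jsB_get l hklt]
    have hca : contA l ((jsB l)[k]'hklt) = gapP l k + gapJ l k := by
      rw [← List.getD_eq_getElem (jsB l) 0 hklt]
      exact contA_at l hklt
    rw [hca]

theorem contBwd_ge (l : List Char) (n : Int) : ∀ (fuel : Nat) (x b : Int),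
    x ≤ contBwd l n fuel x b := by
  intro fuel
  induction fuel with
  | zero => intro x b; simp [contBwd]
  | succ f ih =>
    intro x b
    simp only [contBwd]
    split
    · exact le_refl x
    · exact le_trans (by omega) (ih (x+1) _)

theorem contFwd_ge (l : List Char) (n : Int) : ∀ (fuel : Nat) (x p : Int),
    x ≤ contFwd l n fuel x p := by
  intro fuel
  induction fuel with
  | zero => intro x p; simp [contFwd]
  | succ f ih =>
    intro x p
    simp only [contFwd]
    split
    · exact le_refl x
    · exact le_trans (by omega) (ih (x+1) _)

theorem foldA_snd_nonneg (l : List Char) : ∀ (js : List Int) (acc : Int × Int),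
    (∀ j ∈ js, 0 ≤ j) → 0 ≤ acc.2 →
    0 ≤ (js.foldl
      (fun (acc : Int × Int) j => if acc.1 < contA l j then (contA l j, j) else acc) acc).2 := by
  intro js
  induction js with
  | nil => intro acc _ h; simpa using h
  | cons j rest ih =>
    intro acc hmem hacc
    simp only [List.foldl_cons]
    apply ih _ (fun q hq => hmem q (by simp [hq]))
    split
    · exact hmem j (by simp)
    · exact hacc

theorem contA_ge_two (l : List Char) (j : Int) : 2 ≤ contA l j := by
  unfold contA
  simp only
  exact le_trans (contBwd_ge l _ _ 2 _) (contFwd_ge l _ _ _ _)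

theorem getJunctionsA_eq (l : List Char) : getJunctionsA l = jsB l := by
  unfold getJunctionsA jsB
  simpa using PySem.List.foldl_append_if
    (fun j => decide (PySem.List.pyGet? l j ≠ PySem.List.pyGet? l (j-1)))
    (fun j => j) (PySem.List.pyRange 0 (l.length : Int) 1) []

-- ===== VERDICT (by name: the statement is the Claim_ definition above) =====
theorem maxCont_spec : Claim_equal_maxCont := by
  intro s _
  unfold Spec_maxCont maxCont maxCont_alt
  simp only [getJunctionsA_eq]
  by_cases hjs : jsB s.toList = []
  · rw [hjs, if_pos rfl]
    simp
  · rw [if_neg hjs]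
    have hfold := fold_eq s.toList ((jsB s.toList).length) 0 (by omega) (by omega) (0, -1)
    rw [List.drop_zero] at hfold
    rw [show ((0:Nat):Int) = (0:Int) by norm_num] at hfold
    rw [hfold]
    rw [if_neg]
    intro hneg
    rw [← hfold] at hneg
    obtain ⟨j0, rest, hcons⟩ := List.exists_cons_of_ne_nil hjs
    rw [hcons] at hneg
    simp only [List.foldl_cons] at hneg
    rw [if_pos (by have := contA_ge_two s.toList j0; simpa using by omega)] at hneg
    have hj0 : 0 ≤ j0 := by
      have : j0 ∈ jsB s.toList := by rw [hcons]; simp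
      exact ((mem_jsB s.toList j0).mp this).1
    have hrest : ∀ j ∈ rest, 0 ≤ j := by
      intro j hj
      have : j ∈ jsB s.toList := by rw [hcons]; simp [hj]
      exact ((mem_jsB s.toList j).mp this).1
    have := foldA_snd_nonneg s.toList rest (contA s.toList j0, j0) hrest (by simpa using hj0)
    omega
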